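-- pv_equiv track=rewrite | github.com/metaescape/Wen | wen/gpt.py | longest_substring_to_suffix_match
-- ===== SOURCE A (Python) =====
-- def longest_substring_to_suffix_match(
--     context_key: tuple, context_query: tuple
-- ):
--     """
--     context_key 的后缀必须完全匹配 context_query 的某个子序列
--     返回最长匹配长度和最长匹配子串在 context_query 中的结束位置
--
--     >>> longest_substring_to_suffix_match((1,2,3,4,5), (3,4,5,7))
--     (3, 2)
--     """
--     len_key, len_query = len(context_key), len(context_query)
--     max_match_length = 0
--     max_match_end_index = -1
--
--     for query_end in range(len_query):
--         match_length = 0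
--
--         for key_end in range(min(len_key, len_query - query_end)):
--             if (
--                 context_query[-query_end - 1 - key_end]
--                 == context_key[-key_end - 1]
--             ):
--                 match_length += 1
--                 if match_length > max_match_length:
--                     max_match_length = match_length
--                     max_match_end_index = len_query - query_end - 1
--             else:
--                 break
--
--     return max_match_length, max_match_end_index
-- ===== SOURCE B (Python) =====
-- def longest_substring_to_suffix_match(context_key, context_query):
--     # Z-algorithm on s = reversed(key) + sentinel + reversed(query):
--     # z[len_key+1+j] is the length of the match of key's suffix against the
--     # substring of query ending at position len_query-1-j.
--     rk = list(context_key)[::-1]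
--     rq = list(context_query)[::-1]
--     s = rk + [None] + rq
--     n = len(s)
--     z = [0]
--     l = r = 0
--     for i in range(1, n):
--         k = min(z[i - l], r - i) if i < r else 0
--         while i + k < n and s[k] == s[i + k]:
--             k += 1
--         z.append(k)
--         if i + k > r:
--             l, r = i, i + k
--     best_len, best_end = 0, -1
--     lk = len(rk)
--     for j in range(len(rq)):
--         m = z[lk + 1 + j]
--         if m > best_len:
--             best_len, best_end = m, len(rq) - 1 - j
--     return best_len, best_end
-- ===== Notes on version B (the rewrite author's own statement) =====
-- stated objective: faster
-- what changed: Replaces A's per-end-position rescan (nested loops over every query end position and key offset) by a single Z-algorithm pass over reversed(key) + sentinel + reversed(query) that yields all suffix-match lengths at once, followed by one scan picking the maximum with A's tie-break.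
import Mathlib
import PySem

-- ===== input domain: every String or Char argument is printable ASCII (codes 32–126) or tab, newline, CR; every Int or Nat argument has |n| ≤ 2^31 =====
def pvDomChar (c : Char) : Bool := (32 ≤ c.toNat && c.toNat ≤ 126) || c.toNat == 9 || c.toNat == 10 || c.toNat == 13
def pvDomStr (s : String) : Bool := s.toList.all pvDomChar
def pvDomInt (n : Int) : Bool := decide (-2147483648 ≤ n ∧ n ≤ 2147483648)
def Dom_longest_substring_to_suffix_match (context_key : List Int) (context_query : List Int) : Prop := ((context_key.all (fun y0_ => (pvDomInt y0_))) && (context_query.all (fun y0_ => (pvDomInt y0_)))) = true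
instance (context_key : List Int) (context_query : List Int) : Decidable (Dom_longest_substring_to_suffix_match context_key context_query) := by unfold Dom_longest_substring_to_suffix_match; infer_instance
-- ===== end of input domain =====

-- B replaces A's quadratic per-end-position rescan by the Z-algorithm on
-- reversed(key) ++ sentinel ++ reversed(query): objective 'faster' (O(nk*nq) → O(nk+nq)).

-- ===== PORT A =====
-- A's inner 'for key_end in range(min(...))' loop with its break, state (match_length, max_len, max_idx)
def pvLoopA (ck cq : List Int) (q : Int) : List Int → Int × Int × Int → Int × Int × Int
  | [], st => st
  | ke :: rest, (ml, mx, mi) =>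
    if PySem.List.pyGet? cq (-q - 1 - ke) = PySem.List.pyGet? ck (-ke - 1) then
      let ml' := ml + 1
      if mx < ml' then pvLoopA ck cq q rest (ml', ml', (cq.length : Int) - q - 1)
      else pvLoopA ck cq q rest (ml', mx, mi)
    else (ml, mx, mi)

def longest_substring_to_suffix_match (context_key : List Int) (context_query : List Int) : Int × Int :=
  let len_key : Int := context_key.length
  let len_query : Int := context_query.length
  (PySem.List.pyRange 0 len_query 1).foldl
    (fun (acc : Int × Int) q =>
      let st := pvLoopA context_key context_query q
        (PySem.List.pyRange 0 (min len_key (len_query - q)) 1) (0, acc.1, acc.2)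
      (st.2.1, st.2.2))
    (0, -1)

-- ===== PORT B =====
-- B's 'while i + k < n and s[k] == s[i + k]: k += 1' counts successive equal pairs of
-- s.drop k0 and s.drop (i+k0); this structural recursion is that while loop, exactly.
def pvMatchLen : List (Option Int) → List (Option Int) → Nat
  | a :: x, b :: y => if a = b then pvMatchLen x y + 1 else 0
  | _, _ => 0

-- one iteration of B's 'for i in range(1, n)' Z loop, state (z, l, r)
def pvZStep (s : List (Option Int)) (st : List Nat × Nat × Nat) (i : Nat) : List Nat × Nat × Nat :=
  let z := st.1
  let l := st.2.1
  let r := st.2.2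
  let k0 := if i < r then min (z.getD (i - l) 0) (r - i) else 0
  let k := k0 + pvMatchLen (s.drop k0) (s.drop (i + k0))
  if r < i + k then (z ++ [k], i, i + k) else (z ++ [k], l, r)

def longest_substring_to_suffix_match_alt (context_key : List Int) (context_query : List Int) : Int × Int :=
  let rk : List (Option Int) := (context_key.reverse).map Option.some
  let rq : List (Option Int) := (context_query.reverse).map Option.some
  let s := rk ++ none :: rq
  let n := s.length
  let z := ((List.range' 1 (n - 1)).foldl (pvZStep s) ([0], 0, 0)).1
  let lk := rk.length
  (List.range rq.length).foldl
    (fun (b : Int × Int) j =>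
      let m := z.getD (lk + 1 + j) 0
      if b.1 < (m : Int) then ((m : Int), (rq.length : Int) - 1 - j) else b)
    (0, -1)

-- ===== PRECONDITION & SPEC =====
def Spec_longest_substring_to_suffix_match (context_key : List Int) (context_query : List Int) (out : Int × Int) : Prop := out = longest_substring_to_suffix_match_alt context_key context_query
instance (context_key : List Int) (context_query : List Int) (out : Int × Int) : Decidable (Spec_longest_substring_to_suffix_match context_key context_query out) := by unfold Spec_longest_substring_to_suffix_match; infer_instance

-- ===== CLAIM (what is proved, stated in full; the proofs are below) =====
def Claim_equal_longest_substring_to_suffix_match : Prop := ∀ (context_key : List Int) (context_query : List Int), Dom_longest_substring_to_suffix_match context_key context_query → Spec_longest_substring_to_suffix_match context_key context_query (longest_substring_to_suffix_match context_key context_query)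


-- ===== LEMMAS AND PROOFS =====

-- pvMatchLen is the length of the longest common prefix; basic facts
theorem pvMatchLen_le_right : ∀ x y : List (Option Int), pvMatchLen x y ≤ y.length := by
  intro x
  induction x with
  | nil => intro y; cases y <;> simp [pvMatchLen]
  | cons a x ih =>
    intro y
    cases y with
    | nil => simp [pvMatchLen]
    | cons b y =>
      simp only [pvMatchLen]
      split
      · simpa using Nat.succ_le_succ (ih y)
      · simp

theorem pv_take_eq : ∀ (k : Nat) (x y : List (Option Int)), k ≤ pvMatchLen x y →
    x.take k = y.take k := by
  intro k
  induction k with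
  | zero => intro x y _; simp
  | succ k ih =>
    intro x y h
    cases x with
    | nil => cases y <;> simp [pvMatchLen] at h
    | cons a x =>
      cases y with
      | nil => simp [pvMatchLen] at h
      | cons b y =>
        simp only [pvMatchLen] at h
        by_cases hab : a = b
        · subst hab
          rw [if_pos rfl] at h
          simp [List.take_succ_cons, ih x y (by omega)]
        · simp [hab] at h

theorem pv_matchLen_add : ∀ (k : Nat) (x y : List (Option Int)), x.take k = y.take k →
    k ≤ x.length → pvMatchLen x y = k + pvMatchLen (x.drop k) (y.drop k) := by
  intro k
  induction k with
  | zero => intro x y _ _; simp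
  | succ k ih =>
    intro x y h hk
    cases x with
    | nil => simp at hk
    | cons a x =>
      cases y with
      | nil => simp [List.take_succ_cons] at h
      | cons b y =>
        simp only [List.take_succ_cons, List.cons.injEq] at h
        simp only [pvMatchLen, List.drop_succ_cons, if_pos h.1]
        rw [ih x y h.2 (by simpa using hk)]
        omega

theorem pv_take_drop (x y : List (Option Int)) (a b c : Nat)
    (h : x.take a = y.take a) (hbc : b + c ≤ a) :
    (x.drop b).take c = (y.drop b).take c := by
  have h1 : (x.drop b).take c = (x.take (b + c)).drop b := by
    rw [List.drop_take]; congr 1; omega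
  have h2 : (y.drop b).take c = (y.take (b + c)).drop b := by
    rw [List.drop_take]; congr 1; omega
  rw [h1, h2]
  have : x.take (b + c) = y.take (b + c) := by
    have h2 := congrArg (List.take (b + c)) h
    simpa [List.take_take, Nat.min_eq_left (show b + c ≤ a by omega)] using h2
  rw [this]

theorem pv_sentinel : ∀ (a t b : List (Option Int)), (∀ o ∈ t, o ≠ none) →
    pvMatchLen (a ++ none :: b) t = pvMatchLen a t := by
  intro a
  induction a with
  | nil =>
    intro t b ht
    cases t with
    | nil => simp [pvMatchLen]
    | cons c t =>
      have : c ≠ none := ht c (by simp)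
      simp [pvMatchLen, Ne.symm this]
  | cons x a ih =>
    intro t b ht
    cases t with
    | nil => simp [pvMatchLen]
    | cons c t =>
      simp only [List.cons_append, pvMatchLen]
      split
      · rw [ih t b (fun o ho => ht o (by simp [ho]))]
      · rfl

def pvMatchLenI : List Int → List Int → Nat
  | a :: x, b :: y => if a = b then pvMatchLenI x y + 1 else 0
  | _, _ => 0

theorem pv_map_some : ∀ x y : List Int,
    pvMatchLen (x.map Option.some) (y.map Option.some) = pvMatchLenI x y := by
  intro x
  induction x with
  | nil => intro y; cases y <;> simp [pvMatchLen, pvMatchLenI]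
  | cons a x ih =>
    intro y
    cases y with
    | nil => simp [pvMatchLen, pvMatchLenI]
    | cons b y =>
      simp only [List.map_cons, pvMatchLen, pvMatchLenI, Option.some.injEq]
      split <;> simp [ih]

-- Z-loop invariant
def pvZInv (s : List (Option Int)) (t : Nat) (st : List Nat × Nat × Nat) : Prop :=
  st.1.length = t + 1 ∧
  (∀ j, 1 ≤ j → j ≤ t → st.1.getD j 0 = pvMatchLen s (s.drop j)) ∧
  st.2.1 ≤ t ∧ st.2.2 ≤ s.length ∧
  st.2.2 - st.2.1 ≤ pvMatchLen s (s.drop st.2.1) ∧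
  (st.2.2 = 0 ∨ 1 ≤ st.2.1)

theorem pvZStep_inv (s : List (Option Int)) (st : List Nat × Nat × Nat) (t : Nat)
    (h : pvZInv s t st) (ht : t + 1 ≤ s.length) :
    pvZInv s (t + 1) (pvZStep s st (t + 1)) := by
  obtain ⟨z, l, r⟩ := st
  obtain ⟨hlen, hz, hl, hr, hbox, hl1⟩ := h
  simp only at hlen hz hl hr hbox hl1
  -- the z-entry computed for index i = t + 1 is the true common-prefix length
  have hk : (if t + 1 < r then min (z.getD (t + 1 - l) 0) (r - (t + 1)) else 0) +
      pvMatchLen (s.drop (if t + 1 < r then min (z.getD (t + 1 - l) 0) (r - (t + 1)) else 0))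
        (s.drop (t + 1 + (if t + 1 < r then min (z.getD (t + 1 - l) 0) (r - (t + 1)) else 0)))
      = pvMatchLen s (s.drop (t + 1)) := by
    by_cases hir : t + 1 < r
    · rw [if_pos hir]
      have hl1' : 1 ≤ l := by rcases hl1 with h0 | h1 <;> omega
      have hzv : z.getD (t + 1 - l) 0 = pvMatchLen s (s.drop (t + 1 - l)) :=
        hz _ (by omega) (by omega)
      set k0 := min (z.getD (t + 1 - l) 0) (r - (t + 1)) with hk0
      have hk0z : k0 ≤ pvMatchLen s (s.drop (t + 1 - l)) := by rw [← hzv]; omega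
      have htake1 : s.take k0 = (s.drop (t + 1 - l)).take k0 := pv_take_eq k0 _ _ hk0z
      have htake2 : (s.drop (t + 1 - l)).take k0 = (s.drop (t + 1)).take k0 := by
        have hb : s.take (r - l) = (s.drop l).take (r - l) := pv_take_eq _ _ _ hbox
        have h2 := pv_take_drop s (s.drop l) (r - l) (t + 1 - l) k0 hb (by omega)
        rw [List.drop_drop] at h2
        have hil : l + (t + 1 - l) = t + 1 := by omega
        rw [hil] at h2
        exact h2
      have htake : s.take k0 = (s.drop (t + 1)).take k0 := htake1.trans htake2
      rw [pv_matchLen_add k0 s (s.drop (t + 1)) htake (by omega)]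
      rw [List.drop_drop]
    · rw [if_neg hir]; simp
  simp only [pvZStep]
  set k := (if t + 1 < r then min (z.getD (t + 1 - l) 0) (r - (t + 1)) else 0) +
      pvMatchLen (s.drop (if t + 1 < r then min (z.getD (t + 1 - l) 0) (r - (t + 1)) else 0))
        (s.drop (t + 1 + (if t + 1 < r then min (z.getD (t + 1 - l) 0) (r - (t + 1)) else 0)))
      with hkdef
  have hk_le : k ≤ s.length - (t + 1) := by
    rw [hk]
    calc pvMatchLen s (s.drop (t + 1)) ≤ (s.drop (t + 1)).length := pvMatchLen_le_right _ _
    _ = s.length - (t + 1) := by simp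
  have hgetD : ∀ j, 1 ≤ j → j ≤ t + 1 → (z ++ [k]).getD j 0 = pvMatchLen s (s.drop j) := by
    intro j hj1 hj2
    by_cases hjt : j ≤ t
    · rw [List.getD_append _ _ _ _ (by omega)]
      exact hz j hj1 hjt
    · have hj : j = t + 1 := by omega
      subst hj
      rw [List.getD_append_right _ _ _ _ (by omega), hlen]
      simpa using hk
  have hkK : k = pvMatchLen s (s.drop (t + 1)) := hk
  split_ifs with hbig
  · refine ⟨by simp [hlen], hgetD, ?_, ?_, ?_, ?_⟩
    · show t + 1 ≤ t + 1
      omega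
    · show t + 1 + k ≤ s.length
      omega
    · show t + 1 + k - (t + 1) ≤ pvMatchLen s (s.drop (t + 1))
      omega
    · show t + 1 + k = 0 ∨ 1 ≤ t + 1
      omega
  · refine ⟨by simp [hlen], hgetD, ?_, ?_, ?_, ?_⟩
    · show l ≤ t + 1
      omega
    · exact hr
    · exact hbox
    · exact hl1

theorem pvZ_fold (s : List (Option Int)) : ∀ t : Nat, t ≤ s.length - 1 →
    pvZInv s t ((List.range' 1 t).foldl (pvZStep s) ([0], 0, 0)) := by
  intro t
  induction t with
  | zero =>
    intro _
    exact ⟨rfl, fun j hj1 hj2 => absurd hj2 (by omega), Nat.le_refl 0, Nat.zero_le _,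
      Nat.zero_le _, Or.inl rfl⟩
  | succ t ih =>
    intro ht
    have hc : List.range' 1 (t + 1) = List.range' 1 t ++ [t + 1] := by
      rw [List.range'_concat]
      simp [Nat.add_comm]
    rw [hc, List.foldl_append]
    simp only [List.foldl_cons, List.foldl_nil]
    exact pvZStep_inv s _ t (ih (by omega)) (by omega)

theorem pvZ_getD (s : List (Option Int)) (j : Nat) (h1 : 1 ≤ j) (h2 : j ≤ s.length - 1) :
    (((List.range' 1 (s.length - 1)).foldl (pvZStep s) ([0], 0, 0)).1).getD j 0
      = pvMatchLen s (s.drop j) := by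
  exact (pvZ_fold s (s.length - 1) (Nat.le_refl _)).2.1 j h1 h2

theorem pvZ_entry (ck cq : List Int) (j : Nat) (hj : j < cq.length) :
    ((((List.range' 1 ((((ck.reverse.map Option.some) ++ none :: (cq.reverse.map Option.some)).length) - 1)).foldl
        (pvZStep ((ck.reverse.map Option.some) ++ none :: (cq.reverse.map Option.some))) ([0], 0, 0)).1).getD
      ((ck.reverse.map Option.some).length + 1 + j) 0)
      = pvMatchLenI ck.reverse (cq.reverse.drop j) := by
  set rk := ck.reverse.map Option.some with hrk
  set rq := cq.reverse.map Option.some with hrq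
  set s := rk ++ none :: rq with hs
  have hlk : rk.length = ck.length := by simp [hrk]
  have hlq : rq.length = cq.length := by simp [hrq]
  have hn : s.length = ck.length + 1 + cq.length := by
    simp only [hs, List.length_append, List.length_cons, hlk, hlq]
    omega
  rw [pvZ_getD s _ (by omega) (by omega)]
  have h1 : s.drop (rk.length + 1 + j) = rq.drop j := by
    rw [hs, List.drop_append, List.drop_eq_nil_of_le (by omega)]
    simp only [List.nil_append]
    have : rk.length + 1 + j - rk.length = j + 1 := by omega
    rw [this, List.drop_succ_cons]
  rw [h1]
  have hnone : ∀ o ∈ rq.drop j, o ≠ none := by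
    intro o ho
    have hmem : o ∈ rq := List.mem_of_mem_drop ho
    rw [hrq] at hmem
    obtain ⟨v, _, hv⟩ := List.mem_map.mp hmem
    rw [← hv]
    simp
  rw [pv_sentinel rk (rq.drop j) rq hnone]
  have h2 : rq.drop j = (cq.reverse.drop j).map Option.some := by
    rw [hrq, List.map_drop]
  rw [h2, hrk, pv_map_some]

-- the common reference form: fold over end offsets of the per-offset match length
def pvRef (ck cq : List Int) : Int × Int :=
  (List.range cq.length).foldl
    (fun (b : Int × Int) j =>
      let m := pvMatchLenI ck.reverse (cq.reverse.drop j)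
      if b.1 < (m : Int) then ((m : Int), (cq.length : Int) - 1 - j) else b)
    (0, -1)

theorem pvB_eq (ck cq : List Int) :
    longest_substring_to_suffix_match_alt ck cq = pvRef ck cq := by
  simp only [longest_substring_to_suffix_match_alt, pvRef, List.length_map, List.length_reverse]
  refine PySem.List.foldl_congr_mem _ _ _ _ ?_
  intro acc j hj
  have hj' : j < cq.length := List.mem_range.mp hj
  have hz := pvZ_entry ck cq j hj'
  simp only [List.length_map, List.length_reverse] at hz
  rw [hz]

theorem pvMatchLenI_nil_left : ∀ y : List Int, pvMatchLenI [] y = 0 := by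
  intro y; cases y <;> rfl

theorem pvMatchLenI_nil_right : ∀ x : List Int, pvMatchLenI x [] = 0 := by
  intro x; cases x <;> rfl

theorem pvLoopA_spec (ck cq : List Int) (qn : Nat) (hq : qn < cq.length) :
    ∀ (N ke0 : Nat) (mx mi : Int),
      ke0 + N = min ck.length (cq.length - qn) → (ke0 : Int) ≤ mx →
      pvLoopA ck cq (qn : Int)
        (PySem.List.pyRange (ke0 : Int) (min (ck.length : Int) ((cq.length : Int) - (qn : Int))) 1)
        ((ke0 : Int), mx, mi)
      = (((ke0 + pvMatchLenI (ck.reverse.drop ke0) (cq.reverse.drop (qn + ke0)) : Nat) : Int),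
         if mx < ((ke0 + pvMatchLenI (ck.reverse.drop ke0) (cq.reverse.drop (qn + ke0)) : Nat) : Int)
         then (((ke0 + pvMatchLenI (ck.reverse.drop ke0) (cq.reverse.drop (qn + ke0)) : Nat) : Int),
               (cq.length : Int) - (qn : Int) - 1)
         else (mx, mi)) := by
  intro N
  induction N with
  | zero =>
    intro ke0 mx mi hK hmx
    rw [PySem.List.pyRange_one_eq_nil (by omega)]
    simp only [pvLoopA]
    have hM : pvMatchLenI (ck.reverse.drop ke0) (cq.reverse.drop (qn + ke0)) = 0 := by
      by_cases hc : ck.length ≤ cq.length - qn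
      · have h1 : ck.length ≤ ke0 := by omega
        rw [show ck.reverse.drop ke0 = [] from List.drop_eq_nil_of_le (by simpa using h1),
          pvMatchLenI_nil_left]
      · have h1 : cq.length ≤ qn + ke0 := by omega
        rw [show cq.reverse.drop (qn + ke0) = [] from List.drop_eq_nil_of_le (by simpa using h1),
          pvMatchLenI_nil_right]
    rw [hM, if_neg (show ¬ mx < (((ke0 + 0 : Nat)) : Int) by omega)]
    simp only [Prod.mk.injEq]
    and_intros <;> trivial
  | succ N ih =>
    intro ke0 mx mi hK hmx
    have hke0k : ke0 < ck.length := by omega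
    have hke0q : qn + ke0 < cq.length := by omega
    rw [PySem.List.pyRange_one_cons (by omega : ((ke0 : Nat) : Int) < min ((ck.length : Int)) ((cq.length : Int) - (qn : Int)))]
    have hck : PySem.List.pyGet? ck (-((ke0 : Nat) : Int) - 1) = ck.reverse[ke0]? := by
      have h0 := PySem.List.pyGet?_neg_natCast ck (ke0 + 1) (by omega) (by omega)
      rw [show (-(((ke0 + 1 : Nat) : Int))) = -((ke0 : Nat) : Int) - 1 by push_cast; ring] at h0
      rw [h0, List.getElem?_reverse (by simpa using hke0k)]
      congr 1
      omega
    have hcq : PySem.List.pyGet? cq (-((qn : Nat) : Int) - 1 - ((ke0 : Nat) : Int)) = cq.reverse[qn + ke0]? := by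
      have h0 := PySem.List.pyGet?_neg_natCast cq (qn + ke0 + 1) (by omega) (by omega)
      rw [show (-(((qn + ke0 + 1 : Nat) : Int))) = -((qn : Nat) : Int) - 1 - ((ke0 : Nat) : Int) by push_cast; ring] at h0
      rw [h0, List.getElem?_reverse (by simpa using hke0q)]
      congr 1
      omega
    have pk : ke0 < ck.reverse.length := by simpa using hke0k
    have pq : qn + ke0 < cq.reverse.length := by simpa using hke0q
    have hdk : ck.reverse.drop ke0 = ck.reverse[ke0] :: ck.reverse.drop (ke0 + 1) :=
      List.drop_eq_getElem_cons pk
    have hdq : cq.reverse.drop (qn + ke0) = cq.reverse[qn + ke0] :: cq.reverse.drop (qn + ke0 + 1) :=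
      List.drop_eq_getElem_cons pq
    simp only [pvLoopA, hck, hcq, List.getElem?_eq_getElem pk, List.getElem?_eq_getElem pq,
      Option.some.injEq]
    by_cases heq : cq.reverse[qn + ke0] = ck.reverse[ke0]
    · rw [if_pos heq]
      have hM : pvMatchLenI (ck.reverse.drop ke0) (cq.reverse.drop (qn + ke0))
          = pvMatchLenI (ck.reverse.drop (ke0 + 1)) (cq.reverse.drop (qn + (ke0 + 1))) + 1 := by
        rw [hdk, hdq, show qn + (ke0 + 1) = qn + ke0 + 1 by omega]
        simp only [pvMatchLenI]
        rw [if_pos heq.symm]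
      rw [hM]
      rw [show ((ke0 : Nat) : Int) + 1 = (((ke0 + 1 : Nat)) : Int) by push_cast; ring]
      by_cases h1 : mx < (((ke0 + 1 : Nat)) : Int)
      · rw [if_pos h1, ih (ke0 + 1) (((ke0 + 1 : Nat)) : Int) ((cq.length : Int) - (qn : Int) - 1)
          (by omega) (by omega)]
        split_ifs <;> simp only [Prod.mk.injEq] <;> and_intros <;> first | trivial | omega
      · rw [if_neg h1, ih (ke0 + 1) mx mi (by omega) (by omega)]
        split_ifs <;> simp only [Prod.mk.injEq] <;> and_intros <;> first | trivial | omega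
    · rw [if_neg heq]
      have hM0 : pvMatchLenI (ck.reverse.drop ke0) (cq.reverse.drop (qn + ke0)) = 0 := by
        rw [hdk, hdq]
        simp only [pvMatchLenI]
        rw [if_neg (fun h => heq h.symm)]
      rw [hM0, if_neg (show ¬ mx < (((ke0 + 0 : Nat)) : Int) by omega)]
      simp only [Prod.mk.injEq]
      and_intros <;> trivial

theorem pvFoldA_ref (ck cq : List Int) : ∀ (l : List Nat) (acc : Int × Int),
    (∀ j ∈ l, j < cq.length) → 0 ≤ acc.1 →
    List.foldl (fun (a : Int × Int) (k : Nat) =>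
      ((pvLoopA ck cq ((k : Nat) : Int)
          (PySem.List.pyRange 0 (min ((ck.length : Int)) ((cq.length : Int) - ((k : Nat) : Int))))
          (0, a.1, a.2)).2.1,
       (pvLoopA ck cq ((k : Nat) : Int)
          (PySem.List.pyRange 0 (min ((ck.length : Int)) ((cq.length : Int) - ((k : Nat) : Int))))
          (0, a.1, a.2)).2.2)) acc l
    = List.foldl (fun (b : Int × Int) (j : Nat) =>
        if b.1 < ((pvMatchLenI ck.reverse (cq.reverse.drop j) : Nat) : Int)
        then (((pvMatchLenI ck.reverse (cq.reverse.drop j) : Nat) : Int),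
              (cq.length : Int) - 1 - (j : Int))
        else b) acc l := by
  intro l
  induction l with
  | nil => intro acc _ _; rfl
  | cons k rest ih =>
    intro acc hmem h0
    simp only [List.foldl_cons]
    have hk : k < cq.length := hmem k (by simp)
    have hstep := pvLoopA_spec ck cq k hk (min ck.length (cq.length - k)) 0 acc.1 acc.2
      (by omega) (by omega)
    simp only [Nat.cast_zero, Nat.zero_add, Nat.add_zero, List.drop_zero] at hstep
    rw [hstep]
    by_cases hc : acc.1 < ((pvMatchLenI ck.reverse (cq.reverse.drop k) : Nat) : Int)
    · rw [if_pos hc, if_pos hc]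
      have hidx : ((cq.length : Int) - (k : Int) - 1) = (cq.length : Int) - 1 - (k : Int) := by ring
      simp only [hidx]
      exact ih _ (fun j hj => hmem j (by simp [hj])) (by omega)
    · rw [if_neg hc, if_neg hc]
      exact ih _ (fun j hj => hmem j (by simp [hj])) h0

theorem pvA_eq (ck cq : List Int) :
    longest_substring_to_suffix_match ck cq = pvRef ck cq := by
  simp only [longest_substring_to_suffix_match, pvRef]
  rw [PySem.List.pyRange_one]
  have htn : (((cq.length : Int)) - 0).toNat = cq.length := by omega
  rw [htn, List.foldl_map]
  simp only [zero_add]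
  exact pvFoldA_ref ck cq (List.range cq.length) (0, -1)
    (fun j hj => List.mem_range.mp hj) (by norm_num)

theorem pv_main (ck cq : List Int) :
    longest_substring_to_suffix_match ck cq = longest_substring_to_suffix_match_alt ck cq := by
  rw [pvA_eq, pvB_eq]

-- ===== VERDICT (by name: the statement is the Claim_ definition above) =====
theorem longest_substring_to_suffix_match_spec : Claim_equal_longest_substring_to_suffix_match := by
  intro ck cq _
  unfold Spec_longest_substring_to_suffix_match
  exact pv_main ck cq
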